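-- pv_equiv track=rewrite | github.com/aarohim24/NotesGenerator | gui.py | _parse_flashcards
-- ===== SOURCE A (Python) =====
-- def _parse_flashcards(text):
--     cards = []
--     current_q = None
--
--     for line in text.split('\n'):
--         line = line.strip()
--         if line.startswith('Q:'):
--             if current_q:
--                 cards.append((current_q, ""))
--             current_q = line[2:].strip()
--         elif line.startswith('A:') and current_q:
--             cards.append((current_q, line[2:].strip()))
--             current_q = None
--
--     if current_q:
--         cards.append((current_q, ""))
--     return cards
-- ===== SOURCE B (Python) =====
-- def _parse_flashcards(text):
--     # Two-pass: tokenize lines into Q/A events, then pair each non-empty Q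
--     # with the immediately following event when it is an A.
--     events = []
--     for line in text.split('\n'):
--         line = line.strip()
--         if line.startswith('Q:'):
--             events.append(('Q', line[2:].strip()))
--         elif line.startswith('A:'):
--             events.append(('A', line[2:].strip()))
--
--     cards = []
--     for i in range(len(events)):
--         kind, content = events[i]
--         if kind == 'Q' and content:
--             if i + 1 < len(events) and events[i + 1][0] == 'A':
--                 cards.append((content, events[i + 1][1]))
--             else:
--                 cards.append((content, ""))
--     return cards
-- ===== Notes on version B (the rewrite author's own statement) =====
-- stated objective: alternative
-- what changed: Replaces A's single-pass current_q state machine with a two-pass structure: first tokenize the lines into a list of Q/A events, then pair each non-empty Q with the immediately following event when it is an A (lookahead), with no mutable pending-question state.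
import Mathlib
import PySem

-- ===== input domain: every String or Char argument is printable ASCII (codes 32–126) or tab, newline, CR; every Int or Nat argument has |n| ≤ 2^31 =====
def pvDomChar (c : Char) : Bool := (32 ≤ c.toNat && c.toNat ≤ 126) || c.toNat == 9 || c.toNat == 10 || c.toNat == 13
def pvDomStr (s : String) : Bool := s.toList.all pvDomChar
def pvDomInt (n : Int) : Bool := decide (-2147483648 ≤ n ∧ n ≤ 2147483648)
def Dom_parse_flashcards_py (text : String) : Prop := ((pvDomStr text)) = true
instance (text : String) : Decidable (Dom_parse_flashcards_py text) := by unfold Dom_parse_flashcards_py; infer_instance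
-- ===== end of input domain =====

-- B replaces A's running current_q state machine by a tokenize-then-lookahead two-pass structure; same cost, no speed claim.

-- ===== PORT A =====
-- Python truthiness of `current_q` (None or str): true iff a non-empty string.
def pvTruthy : Option String → Bool
  | none => false
  | some q => q ≠ ""

-- one iteration of A's `for line in text.split('\n')` loop; state = (cards, current_q)
def pvStepA (st : List (String × String) × Option String) (rawLine : String) :
    List (String × String) × Option String :=
  let line := PySem.Str.strip rawLine
  if PySem.Str.startswith line "Q:" then
    ((if pvTruthy st.2 then st.1 ++ [(st.2.getD "", "")] else st.1),
     some (PySem.Str.strip (PySem.Str.slice line (some 2) none)))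
  else if PySem.Str.startswith line "A:" && pvTruthy st.2 then
    (st.1 ++ [(st.2.getD "", PySem.Str.strip (PySem.Str.slice line (some 2) none))], none)
  else st

-- A's trailing `if current_q: cards.append((current_q, ""))`
def pvFin (st : List (String × String) × Option String) : List (String × String) :=
  if pvTruthy st.2 then st.1 ++ [(st.2.getD "", "")] else st.1

def parse_flashcards_py (text : String) : List (String × String) :=
  pvFin (((PySem.Str.split? text "\n").getD []).foldl pvStepA ([], none))

-- ===== PORT B =====
-- first pass: a stripped line becomes a Q event (true) or an A event (false), others are dropped
def pvClassify (rawLine : String) : Option (Bool × String) :=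
  let line := PySem.Str.strip rawLine
  if PySem.Str.startswith line "Q:" then
    some (true, PySem.Str.strip (PySem.Str.slice line (some 2) none))
  else if PySem.Str.startswith line "A:" then
    some (false, PySem.Str.strip (PySem.Str.slice line (some 2) none))
  else none

-- second pass: each non-empty Q pairs with the next event iff that event is an A (lookahead)
def pvPair : List (Bool × String) → List (String × String)
  | [] => []
  | (true, q) :: rest =>
      if q ≠ "" then
        (q, match rest.head? with | some (false, a) => a | _ => "") :: pvPair rest
      else pvPair rest
  | (false, _) :: rest => pvPair rest

def parse_flashcards_py_alt (text : String) : List (String × String) :=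
  pvPair (((PySem.Str.split? text "\n").getD []).filterMap pvClassify)

-- ===== PRECONDITION & SPEC =====
def Spec_parse_flashcards_py (text : String) (out : List (String × String)) : Prop := out = parse_flashcards_py_alt text
instance (text : String) (out : List (String × String)) : Decidable (Spec_parse_flashcards_py text out) := by unfold Spec_parse_flashcards_py; infer_instance

-- ===== CLAIM (what is proved, stated in full; the proofs are below) =====
def Claim_equal_parse_flashcards_py : Prop := ∀ (text : String), Dom_parse_flashcards_py text → Spec_parse_flashcards_py text (parse_flashcards_py text)

-- ===== LEMMAS AND PROOFS =====

-- A's per-event transition, i.e. pvStepA factored through pvClassify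
def pvStepE (st : List (String × String) × Option String) (ev : Bool × String) :
    List (String × String) × Option String :=
  if ev.1 then
    ((if pvTruthy st.2 then st.1 ++ [(st.2.getD "", "")] else st.1), some ev.2)
  else if pvTruthy st.2 then (st.1 ++ [(st.2.getD "", ev.2)], none) else st

lemma pvStepA_eq (st : List (String × String) × Option String) (l : String) :
    pvStepA st l = ((pvClassify l).map (pvStepE st)).getD st := by
  simp only [pvStepA, pvClassify]
  split_ifs with h1 h2 h3 <;> simp_all [pvStepE]

lemma pvFoldA_eq (lines : List String) (st : List (String × String) × Option String) :
    lines.foldl pvStepA st = (lines.filterMap pvClassify).foldl pvStepE st := by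
  induction lines generalizing st with
  | nil => rfl
  | cons l ls ih =>
      simp only [List.foldl_cons, List.filterMap_cons, pvStepA_eq]
      cases h : pvClassify l <;> simp [ih]

-- the output produced from pending question cq over remaining events
def pvAux (cq : Option String) : List (Bool × String) → List (String × String)
  | [] => if pvTruthy cq then [(cq.getD "", "")] else []
  | (true, q) :: r => (if pvTruthy cq then [(cq.getD "", "")] else []) ++ pvAux (some q) r
  | (false, a) :: r => if pvTruthy cq then (cq.getD "", a) :: pvAux none r else pvAux cq r

lemma pvFoldE_aux (evs : List (Bool × String)) (st : List (String × String) × Option String) :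
    pvFin (evs.foldl pvStepE st) = st.1 ++ pvAux st.2 evs := by
  induction evs generalizing st with
  | nil => simp [pvFin, pvAux]; split <;> simp
  | cons ev r ih =>
      obtain ⟨b, c⟩ := ev
      cases b with
      | true => simp [List.foldl_cons, ih, pvStepE, pvAux]; split <;> simp
      | false =>
          simp only [List.foldl_cons, ih, pvStepE, pvAux]
          by_cases h : pvTruthy st.2 = true <;> simp [h]

-- the answer B's lookahead reads off the head of the remaining events
def pvAnsHead : List (Bool × String) → String
  | (false, a) :: _ => a
  | _ => ""

lemma pvAux_eq_pair (evs : List (Bool × String)) (cq : Option String) :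
    pvAux cq evs = (if pvTruthy cq then [(cq.getD "", pvAnsHead evs)] else []) ++ pvPair evs := by
  induction evs generalizing cq with
  | nil => cases cq <;> simp [pvAux, pvAnsHead, pvPair, pvTruthy]
  | cons ev r ih =>
      obtain ⟨b, c⟩ := ev
      cases b with
      | true =>
          simp only [pvAux, pvPair, ih (some c)]
          by_cases hc : c = ""
          · cases cq <;> simp [hc, pvTruthy, pvAnsHead]
          · cases r with
            | nil => cases cq <;> simp [hc, pvTruthy, pvAnsHead, pvPair]
            | cons e r' =>
                obtain ⟨b', a'⟩ := e
                cases b' <;> cases cq <;> simp [hc, pvTruthy, pvAnsHead]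
      | false =>
          simp only [pvAux, pvPair]
          cases cq with
          | none => simp [pvTruthy, ih none]
          | some q =>
              by_cases hq : q = ""
              · simp [hq, pvTruthy, ih (some "")]
              · simp [hq, pvTruthy, ih none, pvAnsHead]

-- ===== VERDICT (by name: the statement is the Claim_ definition above) =====
theorem parse_flashcards_py_spec : Claim_equal_parse_flashcards_py := by
  intro text _
  unfold Spec_parse_flashcards_py parse_flashcards_py parse_flashcards_py_alt
  rw [pvFoldA_eq, pvFoldE_aux, pvAux_eq_pair]
  simp [pvTruthy]
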